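-- pv_equiv track=rewrite | github.com/jayeshd7/LocustPerformancePOC | PerformancePoc/Common/test_base.py | sort_avaialble_keys_for_count
-- ===== SOURCE A (Python) =====
-- def sort_avaialble_keys_for_count(list_keys):
--     data = list()
--     for key in list_keys:
--         if key == 'id':
--             break
--         else:
--             data.append(key)
--     return data
-- ===== SOURCE B (Python) =====
-- def sort_avaialble_keys_for_count(list_keys):
--     keys = list(list_keys)
--     try:
--         return keys[:keys.index('id')]
--     except ValueError:
--         return keys
-- ===== Notes on version B (the rewrite author's own statement) =====
-- stated objective: idiomatic
-- what changed: Replaces the element-by-element append loop with break by locating the sentinel position via list.index and slicing once.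
import Mathlib
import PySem

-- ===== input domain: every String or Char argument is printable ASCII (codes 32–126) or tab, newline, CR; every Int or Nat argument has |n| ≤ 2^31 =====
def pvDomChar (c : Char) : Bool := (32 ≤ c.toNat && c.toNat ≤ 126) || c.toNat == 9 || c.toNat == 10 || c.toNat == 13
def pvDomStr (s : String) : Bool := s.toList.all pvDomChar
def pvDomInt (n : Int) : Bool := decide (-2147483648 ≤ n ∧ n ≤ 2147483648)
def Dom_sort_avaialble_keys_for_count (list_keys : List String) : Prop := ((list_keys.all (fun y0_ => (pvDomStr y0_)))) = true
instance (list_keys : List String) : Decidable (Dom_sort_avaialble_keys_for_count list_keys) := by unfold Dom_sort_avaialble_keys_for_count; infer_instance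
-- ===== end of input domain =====

-- B replaces A's append-with-break loop by find-the-sentinel-then-slice (idiomatic; same cost).

-- ===== PORT A =====
-- loop with break: recursion over the list, appending until "id" is seen
def sortKeysLoopA : List String → List String → List String
  | acc, [] => acc
  | acc, key :: rest => if key = "id" then acc else sortKeysLoopA (acc ++ [key]) rest

def sort_avaialble_keys_for_count (list_keys : List String) : List String :=
  sortKeysLoopA [] list_keys

-- ===== PORT B =====
def sort_avaialble_keys_for_count_alt (list_keys : List String) : List String :=
  match PySem.List.index? list_keys "id" with
  | some i => PySem.List.slice list_keys none (some (i : Int))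
  | none => list_keys

-- ===== PRECONDITION & SPEC =====
def Spec_sort_avaialble_keys_for_count (list_keys : List String) (out : List String) : Prop := out = sort_avaialble_keys_for_count_alt list_keys
instance (list_keys : List String) (out : List String) : Decidable (Spec_sort_avaialble_keys_for_count list_keys out) := by unfold Spec_sort_avaialble_keys_for_count; infer_instance

-- ===== CLAIM (what is proved, stated in full; the proofs are below) =====
def Claim_equal_sort_avaialble_keys_for_count : Prop := ∀ (list_keys : List String), Dom_sort_avaialble_keys_for_count list_keys → Spec_sort_avaialble_keys_for_count list_keys (sort_avaialble_keys_for_count list_keys)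

-- ===== LEMMAS AND PROOFS =====
theorem sortKeysLoopA_acc (acc : List String) (l : List String) :
    sortKeysLoopA acc l = acc ++ sortKeysLoopA [] l := by
  induction l generalizing acc with
  | nil => simp [sortKeysLoopA]
  | cons k rest ih =>
    simp only [sortKeysLoopA]
    split_ifs with h
    · simp
    · rw [ih (acc ++ [k])]
      conv_rhs => rw [ih ([] ++ [k])]
      simp

theorem eq_alt (l : List String) :
    sortKeysLoopA [] l = sort_avaialble_keys_for_count_alt l := by
  induction l with
  | nil => rfl
  | cons k rest ih =>
    by_cases h : k = "id"
    · subst h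
      rw [sortKeysLoopA, if_pos rfl, sort_avaialble_keys_for_count_alt,
        PySem.List.index?_cons_self]
      simp [PySem.List.slice]
    · rw [sortKeysLoopA, if_neg h, sortKeysLoopA_acc, ih,
        sort_avaialble_keys_for_count_alt, sort_avaialble_keys_for_count_alt,
        PySem.List.index?_cons_of_ne rest h]
      cases hi : PySem.List.index? rest "id" with
      | none => simp [hi]
      | some i =>
        simp only [Option.map_some]
        rw [PySem.List.slice_to_natCast, PySem.List.slice_to_natCast]
        simp [List.take_succ_cons]

-- ===== VERDICT (by name: the statement is the Claim_ definition above) =====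
theorem sort_avaialble_keys_for_count_spec : Claim_equal_sort_avaialble_keys_for_count := by
  intro l _
  unfold Spec_sort_avaialble_keys_for_count sort_avaialble_keys_for_count
  exact eq_alt l
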